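-- pv_equiv track=rewrite | github.com/Jottynha/MAZE-SEARCH-AND-HILL-CLIMBING | trabalho-2/teste.py | best_neighbors
-- ===== SOURCE A (Python) =====
-- from typing import List, Tuple, Optional
--
-- Board = List[int]  # board[col] = row (0..7)
--
-- def conflicts(board: Board) -> int:
--     """Retorna o número de pares de rainhas em conflito (0 = solução)."""
--     n = len(board)
--     c = 0
--     for i in range(n):
--         for j in range(i + 1, n):
--             if board[i] == board[j] or abs(board[i] - board[j]) == abs(i - j):
--                 c += 1
--     return c
--
-- def neighbors(board: Board) -> List[Tuple[Board, Tuple[int, int]]]: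
--     """
--     Gera todos os vizinhos por mover cada rainha em sua coluna para
--     outra linha. Retorna lista de (novo_tabuleiro, (coluna, nova_linha)).
--     """
--     n = len(board)
--     neighs = []
--     for col in range(n):
--         for row in range(n):
--             if row != board[col]:
--                 nb = board.copy()
--                 nb[col] = row
--                 neighs.append((nb, (col, row)))
--     return neighs
--
-- def best_neighbors(board: Board) -> Tuple[int, List[Tuple[Board, Tuple[int, int]]]]:
--     """
--     Calcula o melhor valor de conflito entre vizinhos e retorna (melhor_valor, lista_de_melhores).
--     """
--     neighs = neighbors(board)
--     best_val = None
--     best_list = []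
--     for nb, mv in neighs:
--         val = conflicts(nb)
--         if best_val is None or val < best_val:
--             best_val = val
--             best_list = [(nb, mv)]
--         elif val == best_val:
--             best_list.append((nb, mv))
--     return best_val if best_val is not None else conflicts(board), best_list
-- ===== SOURCE B (Python) =====
-- from typing import List, Tuple, Optional
--
-- Board = List[int]
--
-- def best_neighbors(board: Board) -> Tuple[int, List[Tuple[Board, Tuple[int, int]]]]:
--     """
--     Incremental evaluation: compute the base conflict count once, and for each
--     candidate move obtain its conflict count as base - (attacks on the queen's
--     old square) + (attacks on the new square), each attack count by one O(n) scan.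
--     Then select the minimum and collect the best moves in a second pass.
--     """
--     n = len(board)
--     base = 0
--     for i in range(n):
--         for j in range(i + 1, n):
--             if board[i] == board[j] or abs(board[i] - board[j]) == abs(i - j):
--                 base += 1
--
--     def attacks(col: int, row: int) -> int:
--         a = 0
--         for j in range(n):
--             if j != col and (board[j] == row or abs(board[j] - row) == abs(j - col)):
--                 a += 1
--         return a
--
--     triples = []
--     for col in range(n):
--         out = attacks(col, board[col])
--         for row in range(n):
--             if row != board[col]:
--                 triples.append((base - out + attacks(col, row), col, row))
--
--     if not triples:
--         return base, []
--     best = min(t[0] for t in triples)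
--     best_list = []
--     for val, col, row in triples:
--         if val == best:
--             nb = board.copy()
--             nb[col] = row
--             best_list.append((nb, (col, row)))
--     return best, best_list
-- ===== Notes on version B (the rewrite author's own statement) =====
-- stated objective: faster
-- what changed: A recomputes the full O(n^2) pairwise conflict count for each of the ~n^2 neighbor boards and tracks the minimum in one pass; B computes the base conflict count once and evaluates every move incrementally as base - attacks(old square) + attacks(new square) with one O(n) scan per attack count, then selects the minimum and filters the best moves in a second pass.
import Mathlib
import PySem

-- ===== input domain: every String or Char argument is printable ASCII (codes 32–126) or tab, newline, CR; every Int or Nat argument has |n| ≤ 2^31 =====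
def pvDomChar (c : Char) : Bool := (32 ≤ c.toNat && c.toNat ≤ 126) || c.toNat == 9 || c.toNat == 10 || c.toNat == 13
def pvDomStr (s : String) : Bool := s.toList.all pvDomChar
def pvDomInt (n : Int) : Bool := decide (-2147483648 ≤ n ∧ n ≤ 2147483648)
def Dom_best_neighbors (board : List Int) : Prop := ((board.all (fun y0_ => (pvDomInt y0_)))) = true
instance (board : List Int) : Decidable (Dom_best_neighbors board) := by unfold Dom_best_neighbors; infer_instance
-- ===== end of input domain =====

-- B replaces A's per-neighbor conflict recomputation (conflicts(nb) for each of the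
-- n*(n-1) neighbors) by one base pair count plus an incremental attack-count delta
-- per move (objective: faster).

-- ===== PORT A =====
def pvConflicts (board : List Int) : Int :=
  let n : Int := PySem.List.len board
  (PySem.List.pyRange 0 n 1).foldl (fun c i =>
    (PySem.List.pyRange (i+1) n 1).foldl (fun c j =>
      if PySem.List.pyGetD board i 0 = PySem.List.pyGetD board j 0 ∨
         |PySem.List.pyGetD board i 0 - PySem.List.pyGetD board j 0| = |i - j| then c + 1 else c) c) 0

def pvNeighbors (board : List Int) : List (List Int × (Int × Int)) :=
  let n : Int := PySem.List.len board
  (PySem.List.pyRange 0 n 1).foldl (fun acc col =>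
    (PySem.List.pyRange 0 n 1).foldl (fun acc row =>
      if row ≠ PySem.List.pyGetD board col 0 then
        acc ++ [(PySem.List.pySetD board col row, (col, row))]
      else acc) acc) []

def best_neighbors (board : List Int) : Int × (List (List Int × (Int × Int))) :=
  let neighs := pvNeighbors board
  let r := neighs.foldl (fun (st : Option Int × List (List Int × (Int × Int))) p =>
    let val := pvConflicts p.1
    match st.1 with
    | none => (some val, [p])
    | some bv =>
      if val < bv then (some val, [p])
      else if val = bv then (some bv, st.2 ++ [p])
      else st) (none, [])
  ((match r.1 with | some bv => bv | none => pvConflicts board), r.2)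

-- ===== PORT B =====
def pvBase (board : List Int) : Int :=
  let n : Int := PySem.List.len board
  (PySem.List.pyRange 0 n 1).foldl (fun c i =>
    (PySem.List.pyRange (i+1) n 1).foldl (fun c j =>
      if PySem.List.pyGetD board i 0 = PySem.List.pyGetD board j 0 ∨
         |PySem.List.pyGetD board i 0 - PySem.List.pyGetD board j 0| = |i - j| then c + 1 else c) c) 0

def pvAttacks (board : List Int) (n col row : Int) : Int :=
  (PySem.List.pyRange 0 n 1).foldl (fun a j =>
    if j ≠ col ∧ (PySem.List.pyGetD board j 0 = row ∨
        |PySem.List.pyGetD board j 0 - row| = |j - col|) then a + 1 else a) 0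

def pvTriples (board : List Int) (n base : Int) : List (Int × Int × Int) :=
  (PySem.List.pyRange 0 n 1).foldl (fun acc col =>
    let out := pvAttacks board n col (PySem.List.pyGetD board col 0)
    (PySem.List.pyRange 0 n 1).foldl (fun acc row =>
      if row ≠ PySem.List.pyGetD board col 0 then
        acc ++ [(base - out + pvAttacks board n col row, col, row)]
      else acc) acc) []

def best_neighbors_alt (board : List Int) : Int × (List (List Int × (Int × Int))) :=
  let n : Int := PySem.List.len board
  let base := pvBase board
  let triples := pvTriples board n base
  if triples = [] then (base, [])
  else
    let best := (PySem.List.min? (triples.map (fun t => t.1)) (fun x => x)).getD 0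
    let bl := triples.foldl (fun acc t =>
      if t.1 = best then
        acc ++ [(PySem.List.pySetD board t.2.1 t.2.2, (t.2.1, t.2.2))]
      else acc) []
    (best, bl)

-- ===== PRECONDITION & SPEC =====
def Spec_best_neighbors (board : List Int) (out : Int × (List (List Int × (Int × Int)))) : Prop := out = best_neighbors_alt board
instance (board : List Int) (out : Int × (List (List Int × (Int × Int)))) : Decidable (Spec_best_neighbors board out) := by unfold Spec_best_neighbors; infer_instance

-- ===== CLAIM (what is proved, stated in full; the proofs are below) =====
def Claim_equal_best_neighbors : Prop := ∀ (board : List Int), Dom_best_neighbors board → Spec_best_neighbors board (best_neighbors board)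

-- ===== LEMMAS AND PROOFS =====

-- proof-side abstractions: the queen-pair conflict indicator, the board as a
-- function of a column index, the (col, row) move skeleton, B's move value,
-- and A's min-tracking step
def pvQI (x y d : Int) : Int := if x = y ∨ |x - y| = |d| then 1 else 0

def pvBf (board : List Int) : Int → Int := fun k => PySem.List.pyGetD board k 0

def pvSkel (board : List Int) (n : Int) : List (Int × Int) :=
  (PySem.List.pyRange 0 n 1).flatMap (fun col =>
    ((PySem.List.pyRange 0 n 1).filter (fun row => decide (row ≠ pvBf board col))).map
      (fun row => (col, row)))

def pvVal (board : List Int) (n : Int) (base : Int) (col row : Int) : Int :=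
  base - pvAttacks board n col (PySem.List.pyGetD board col 0) + pvAttacks board n col row

def pvStep {α : Type} : (Option Int × List α) → (Int × α) → (Option Int × List α) := fun st q =>
  match st.1 with
  | none => (some q.1, [q.2])
  | some bv =>
    if q.1 < bv then (some q.1, [q.2])
    else if q.1 = bv then (some bv, st.2 ++ [q.2])
    else st

lemma pv_foldl_ite_sum (p : Int → Prop) [DecidablePred p] (l : List Int) (c : Int) :
    l.foldl (fun c j => if p j then c + 1 else c) c
      = c + (l.map (fun j => if p j then (1:Int) else 0)).sum := by
  induction l generalizing c with
  | nil => simp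
  | cons x t ih =>
    simp only [List.foldl_cons, List.map_cons, List.sum_cons]
    split_ifs <;> rw [ih] <;> ring

lemma pv_Ico_cons (a b : Int) (h : a < b) :
    Finset.Ico a b = insert a (Finset.Ico (a+1) b) := by
  ext x; simp only [Finset.mem_Ico, Finset.mem_insert]; omega

lemma pv_sum_pyRange (f : Int → Int) : ∀ (k : Nat) (a b : Int), b - a ≤ (k : Int) →
    ((PySem.List.pyRange a b 1).map f).sum = ∑ j ∈ Finset.Ico a b, f j := by
  intro k
  induction k with
  | zero =>
    intro a b h
    rw [PySem.List.pyRange_one_eq_nil (by omega), Finset.Ico_eq_empty (by omega)]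
    simp
  | succ k ih =>
    intro a b h
    by_cases hab : a < b
    · rw [PySem.List.pyRange_one_cons hab, pv_Ico_cons a b hab,
        Finset.sum_insert (by simp only [Finset.mem_Ico]; omega)]
      simp only [List.map_cons, List.sum_cons]
      rw [ih (a+1) b (by omega)]
    · rw [PySem.List.pyRange_one_eq_nil (by omega), Finset.Ico_eq_empty (by omega)]
      simp

lemma pv_sum_pyRange' (f : Int → Int) (a b : Int) :
    ((PySem.List.pyRange a b 1).map f).sum = ∑ j ∈ Finset.Ico a b, f j :=
  pv_sum_pyRange f (b - a).toNat a b (by omega)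

lemma pvConflicts_eq (board : List Int) :
    pvConflicts board = ∑ i ∈ Finset.Ico 0 (PySem.List.len board),
      ∑ j ∈ Finset.Ico (i+1) (PySem.List.len board),
        pvQI (pvBf board i) (pvBf board j) (i - j) := by
  unfold pvConflicts
  simp only [pv_foldl_ite_sum, PySem.List.foldl_add, zero_add, pv_sum_pyRange']
  simp only [pvQI, pvBf]
  rfl

lemma pvAttacks_eq (board : List Int) (n col row : Int) :
    pvAttacks board n col row = ∑ j ∈ Finset.Ico 0 n,
      if j ≠ col then pvQI (pvBf board j) row (j - col) else 0 := by
  unfold pvAttacks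
  rw [pv_foldl_ite_sum, zero_add, pv_sum_pyRange']
  apply Finset.sum_congr rfl
  intro j _
  by_cases hj : j = col
  · simp [hj]
  · simp only [hj, pvQI, pvBf, ite_not]
    simp [hj]

lemma pv_foldl_append_if {α β : Type} (p : α → Prop) [DecidablePred p] (f : α → β)
    (l : List α) (acc : List β) :
    l.foldl (fun acc x => if p x then acc ++ [f x] else acc) acc
      = acc ++ (l.filter (fun x => decide (p x))).map f := by
  induction l generalizing acc with
  | nil => simp
  | cons x t ih =>
    simp only [List.foldl_cons, List.filter_cons]
    by_cases hx : p x
    · simp [hx, ih]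
    · simp [hx, ih]

lemma pvNeighbors_eq (board : List Int) :
    pvNeighbors board = (pvSkel board (PySem.List.len board)).map
      (fun p => (PySem.List.pySetD board p.1 p.2, p)) := by
  unfold pvNeighbors pvSkel
  simp only [pv_foldl_append_if, PySem.List.foldl_append_eq_flatMap, List.nil_append,
    List.map_flatMap, List.map_map]
  simp only [pvBf]
  rfl

lemma pvTriples_eq (board : List Int) (n base : Int) :
    pvTriples board n base = (pvSkel board n).map
      (fun p => (pvVal board n base p.1 p.2, p.1, p.2)) := by
  unfold pvTriples pvSkel pvVal
  simp only [pv_foldl_append_if, PySem.List.foldl_append_eq_flatMap, List.nil_append,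
    List.map_flatMap, List.map_map]
  simp only [pvBf]
  rfl

lemma pvSkel_mem (board : List Int) (n : Int) (p : Int × Int) (hp : p ∈ pvSkel board n) :
    0 ≤ p.1 ∧ p.1 < n := by
  unfold pvSkel at hp
  rw [List.mem_flatMap] at hp
  obtain ⟨col, hcol, hm⟩ := hp
  rw [List.mem_map] at hm
  obtain ⟨row, _, rfl⟩ := hm
  exact (PySem.List.mem_pyRange_one.mp hcol)

lemma pvQI_symm (x y d : Int) : pvQI x y d = pvQI y x (-d) := by
  unfold pvQI
  have h : (x = y ∨ |x - y| = |d|) ↔ (y = x ∨ |y - x| = |(-d)|) := by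
    rw [abs_sub_comm, abs_neg, eq_comm]
  exact if_congr h rfl rfl

lemma pv_split (b : Int → Int) (n col : Int) (h0 : 0 ≤ col) (h1 : col < n) :
    (∑ i ∈ Finset.Ico 0 n, ∑ j ∈ Finset.Ico (i+1) n, pvQI (b i) (b j) (i - j))
      = (∑ i ∈ Finset.Ico 0 n, ∑ j ∈ Finset.Ico (i+1) n,
          if i ≠ col ∧ j ≠ col then pvQI (b i) (b j) (i - j) else 0)
        + (∑ j ∈ Finset.Ico 0 n, if j ≠ col then pvQI (b j) (b col) (j - col) else 0) := by
  have step1 : (∑ i ∈ Finset.Ico 0 n, ∑ j ∈ Finset.Ico (i+1) n, pvQI (b i) (b j) (i - j))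
      = (∑ i ∈ Finset.Ico 0 n, ∑ j ∈ Finset.Ico (i+1) n,
          ((if i ≠ col ∧ j ≠ col then pvQI (b i) (b j) (i - j) else 0)
            + (if i = col ∨ j = col then pvQI (b i) (b j) (i - j) else 0))) := by
    apply Finset.sum_congr rfl; intro i hi
    apply Finset.sum_congr rfl; intro j hj
    simp only [Finset.mem_Ico] at hi hj
    by_cases hic : i = col <;> by_cases hjc : j = col <;> simp [hic, hjc]
  rw [step1]
  simp only [Finset.sum_add_distrib]
  congr 1
  have hA : ∀ i ∈ Finset.Ico 0 n,
      (∑ j ∈ Finset.Ico (i+1) n, if i = col ∨ j = col then pvQI (b i) (b j) (i - j) else 0)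
        = if i = col then (∑ j ∈ Finset.Ico (col+1) n, pvQI (b col) (b j) (col - j))
          else (if i + 1 ≤ col then pvQI (b i) (b col) (i - col) else 0) := by
    intro i hi
    simp only [Finset.mem_Ico] at hi
    by_cases hic : i = col
    · subst hic
      rw [if_pos rfl]
      apply Finset.sum_congr rfl; intro j hj
      simp
    · rw [if_neg hic]
      have : (∑ j ∈ Finset.Ico (i+1) n, if i = col ∨ j = col then pvQI (b i) (b j) (i - j) else 0)
          = (∑ j ∈ Finset.Ico (i+1) n, if j = col then pvQI (b i) (b j) (i - j) else 0) := by
        apply Finset.sum_congr rfl; intro j hj; simp [hic]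
      rw [this, Finset.sum_ite_eq' (Finset.Ico (i+1) n) col (fun j => pvQI (b i) (b j) (i - j))]
      simp only [Finset.mem_Ico]
      by_cases hle : i + 1 ≤ col
      · rw [if_pos ⟨hle, h1⟩, if_pos hle]
      · rw [if_neg (by omega), if_neg hle]
  rw [Finset.sum_congr rfl hA]
  -- split both sides at col
  rw [← Finset.Ico_union_Ico_eq_Ico h0 (le_of_lt h1), Finset.sum_union
      (by simp only [Finset.disjoint_left, Finset.mem_Ico]; omega),
    Finset.sum_union (f := fun j => if j ≠ col then pvQI (b j) (b col) (j - col) else 0)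
      (by simp only [Finset.disjoint_left, Finset.mem_Ico]; omega),
    pv_Ico_cons col n h1,
    Finset.sum_insert (by simp only [Finset.mem_Ico]; omega),
    Finset.sum_insert (f := fun j => if j ≠ col then pvQI (b j) (b col) (j - col) else 0)
      (by simp only [Finset.mem_Ico]; omega)]
  have e1 : (∑ i ∈ Finset.Ico 0 col,
      if i = col then (∑ j ∈ Finset.Ico (col+1) n, pvQI (b col) (b j) (col - j))
      else (if i + 1 ≤ col then pvQI (b i) (b col) (i - col) else 0))
      = ∑ i ∈ Finset.Ico 0 col, pvQI (b i) (b col) (i - col) := by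
    apply Finset.sum_congr rfl; intro i hi
    simp only [Finset.mem_Ico] at hi
    rw [if_neg (by omega), if_pos (by omega)]
  have e2 : (∑ i ∈ Finset.Ico (col+1) n,
      if i = col then (∑ j ∈ Finset.Ico (col+1) n, pvQI (b col) (b j) (col - j))
      else (if i + 1 ≤ col then pvQI (b i) (b col) (i - col) else 0)) = 0 := by
    apply Finset.sum_eq_zero; intro i hi
    simp only [Finset.mem_Ico] at hi
    rw [if_neg (by omega), if_neg (by omega)]
  have e3 : (∑ j ∈ Finset.Ico 0 col, if j ≠ col then pvQI (b j) (b col) (j - col) else 0)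
      = ∑ j ∈ Finset.Ico 0 col, pvQI (b j) (b col) (j - col) := by
    apply Finset.sum_congr rfl; intro j hj
    simp only [Finset.mem_Ico] at hj
    rw [if_pos (by omega)]
  have e4 : (∑ j ∈ Finset.Ico (col+1) n, if j ≠ col then pvQI (b j) (b col) (j - col) else 0)
      = ∑ j ∈ Finset.Ico (col+1) n, pvQI (b col) (b j) (col - j) := by
    apply Finset.sum_congr rfl; intro j hj
    simp only [Finset.mem_Ico] at hj
    rw [if_pos (by omega), pvQI_symm, neg_sub]
  rw [e1, e2, e3, e4, if_pos rfl, if_neg (fun h => h rfl)]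
  ring

lemma pv_att_update (b : Int → Int) (n col v r : Int) :
    (∑ j ∈ Finset.Ico 0 n, if j ≠ col then pvQI ((fun j => if j = col then v else b j) j) r (j - col) else 0)
      = ∑ j ∈ Finset.Ico 0 n, if j ≠ col then pvQI (b j) r (j - col) else 0 := by
  apply Finset.sum_congr rfl; intro j _
  by_cases hj : j = col
  · simp [hj]
  · simp [hj]

lemma pv_cf_update (b : Int → Int) (n col v : Int) (h0 : 0 ≤ col) (h1 : col < n) :
    (∑ i ∈ Finset.Ico 0 n, ∑ j ∈ Finset.Ico (i+1) n,
        pvQI ((fun j => if j = col then v else b j) i) ((fun j => if j = col then v else b j) j) (i - j))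
      = (∑ i ∈ Finset.Ico 0 n, ∑ j ∈ Finset.Ico (i+1) n, pvQI (b i) (b j) (i - j))
        - (∑ j ∈ Finset.Ico 0 n, if j ≠ col then pvQI (b j) (b col) (j - col) else 0)
        + (∑ j ∈ Finset.Ico 0 n, if j ≠ col then pvQI (b j) v (j - col) else 0) := by
  set b' : Int → Int := fun j => if j = col then v else b j with hb'
  have hbc : b' col = v := by simp [hb']
  rw [pv_split b' n col h0 h1, pv_split b n col h0 h1]
  have hrest : (∑ i ∈ Finset.Ico 0 n, ∑ j ∈ Finset.Ico (i+1) n,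
      if i ≠ col ∧ j ≠ col then pvQI (b' i) (b' j) (i - j) else 0)
      = ∑ i ∈ Finset.Ico 0 n, ∑ j ∈ Finset.Ico (i+1) n,
        if i ≠ col ∧ j ≠ col then pvQI (b i) (b j) (i - j) else 0 := by
    apply Finset.sum_congr rfl; intro i _
    apply Finset.sum_congr rfl; intro j _
    by_cases hic : i = col
    · simp [hic]
    · by_cases hjc : j = col
      · simp [hjc]
      · simp [hb', hic, hjc]
  have hatt : (∑ j ∈ Finset.Ico 0 n, if j ≠ col then pvQI (b' j) (b' col) (j - col) else 0)
      = ∑ j ∈ Finset.Ico 0 n, if j ≠ col then pvQI (b j) v (j - col) else 0 := by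
    rw [hbc]
    exact pv_att_update b n col v v
  rw [hrest, hatt]
  ring

lemma pvBf_set (board : List Int) (col row i : Int) (hc0 : 0 ≤ col)
    (hc1 : col < PySem.List.len board) (hi0 : 0 ≤ i) :
    pvBf (PySem.List.pySetD board col row) i = if i = col then row else pvBf board i := by
  unfold pvBf
  rw [PySem.List.pySetD_of_nonneg _ _ hc0, PySem.List.pyGetD_of_nonneg _ _ hi0,
    PySem.List.pyGetD_of_nonneg _ _ hi0]
  rw [PySem.List.len_eq] at hc1
  have hclen : col.toNat < board.length := by omega
  rw [List.getD_eq_getElem?_getD, List.getD_eq_getElem?_getD, List.getElem?_set]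
  by_cases hic : i = col
  · rw [if_pos (by omega), if_pos (by omega), hic]
    simp
  · rw [if_neg (by omega), if_neg hic]

lemma pv_key (board : List Int) (col row : Int) (h0 : 0 ≤ col)
    (h1 : col < PySem.List.len board) :
    pvConflicts (PySem.List.pySetD board col row)
      = pvVal board (PySem.List.len board) (pvBase board) col row := by
  have hbase : pvBase board = pvConflicts board := rfl
  have hlen : PySem.List.len (PySem.List.pySetD board col row) = PySem.List.len board := by
    rw [PySem.List.len_eq, PySem.List.len_eq, PySem.List.length_pySetD]
  rw [pvConflicts_eq, hlen]
  unfold pvVal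
  rw [hbase, pvConflicts_eq, pvAttacks_eq, pvAttacks_eq]
  have hpt : ∀ i ∈ Finset.Ico 0 (PySem.List.len board), ∀ j ∈ Finset.Ico (i+1) (PySem.List.len board),
      pvQI (pvBf (PySem.List.pySetD board col row) i) (pvBf (PySem.List.pySetD board col row) j) (i - j)
        = pvQI ((fun k => if k = col then row else pvBf board k) i)
            ((fun k => if k = col then row else pvBf board k) j) (i - j) := by
    intro i hi j hj
    simp only [Finset.mem_Ico] at hi hj
    rw [pvBf_set board col row i h0 h1 hi.1, pvBf_set board col row j h0 h1 (by omega)]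
  rw [Finset.sum_congr rfl (fun i hi => Finset.sum_congr rfl (fun j hj => hpt i hi j hj))]
  rw [pv_cf_update (pvBf board) (PySem.List.len board) col row h0 h1]
  have hbcol : pvBf board col = PySem.List.pyGetD board col 0 := rfl
  rw [hbcol]

lemma pv_foldl_min_le_init (l : List Int) (b : Int) : l.foldl min b ≤ b := by
  induction l generalizing b with
  | nil => simp
  | cons x t ih => exact le_trans (ih (min b x)) (min_le_left b x)

lemma pv_foldl_min_le_mem (l : List Int) (b : Int) : ∀ x ∈ l, l.foldl min b ≤ x := by
  induction l generalizing b with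
  | nil => simp
  | cons y t ih =>
    intro x hx
    rcases List.mem_cons.mp hx with h | h
    · subst h
      exact le_trans (pv_foldl_min_le_init t (min b x)) (min_le_right b x)
    · exact ih (min b y) x h

lemma pv_foldl_min_eq_iff (l : List Int) (b : Int) :
    l.foldl min b = b ↔ ∀ x ∈ l, b ≤ x := by
  induction l generalizing b with
  | nil => simp
  | cons y t ih =>
    simp only [List.foldl_cons, List.mem_cons]
    constructor
    · intro h x hx
      rcases hx with h' | h'
      · subst h'
        calc b = t.foldl min (min b x) := h.symm
        _ ≤ min b x := pv_foldl_min_le_init t (min b x)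
        _ ≤ x := min_le_right b x
      · exact le_trans (by rw [h]) (pv_foldl_min_le_mem t (min b y) x h')
    · intro h
      have hby : b ≤ y := h y (Or.inl rfl)
      have : min b y = b := min_eq_left hby
      rw [this, ih]
      intro x hx; exact h x (Or.inr hx)

lemma pv_track {α : Type} (V : List (Int × α)) : ∀ (bv : Int) (acc : List α),
    V.foldl pvStep (some bv, acc)
      = (some ((V.map Prod.fst).foldl min bv),
        (if ∀ q ∈ V, bv ≤ q.1 then acc else [])
          ++ (V.filter (fun q => decide (q.1 = (V.map Prod.fst).foldl min bv))).map Prod.snd) := by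
  induction V with
  | nil => intro bv acc; simp
  | cons q V ih =>
    intro bv acc
    simp only [List.foldl_cons, List.map_cons, List.filter_cons]
    rcases lt_trichotomy q.1 bv with hlt | heq | hgt
    · have hstep : pvStep (some bv, acc) q = (some q.1, [q.2]) := by
        simp [pvStep, hlt]
      rw [hstep, ih q.1 [q.2]]
      have hmin : min bv q.1 = q.1 := min_eq_right (le_of_lt hlt)
      simp only [hmin]
      have hguard : ¬ (∀ p ∈ (q :: V), bv ≤ p.1) := by
        intro h; exact absurd (h q (List.mem_cons_self)) (not_le.mpr hlt)
      rw [if_neg hguard]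
      set m := (V.map Prod.fst).foldl min q.1 with hmdef
      by_cases hqm : q.1 = m
      · -- q.1 = m means q.1 ≤ everything in V
        have hall : ∀ p ∈ V, q.1 ≤ p.1 := by
          intro p hp
          rw [hqm]
          exact pv_foldl_min_le_mem _ _ _ (List.mem_map_of_mem hp)
        rw [if_pos hall, if_pos (by exact decide_eq_true_eq.mpr hqm ▸ rfl)]
        simp
      · have hnall : ¬ ∀ p ∈ V, q.1 ≤ p.1 := by
          intro h
          exact hqm ((pv_foldl_min_eq_iff _ _).mpr (by
            intro x hx
            rw [List.mem_map] at hx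
            obtain ⟨p, hp, rfl⟩ := hx
            exact h p hp)).symm
        rw [if_neg hnall]
        simp [hqm]
    · have hstep : pvStep (some bv, acc) q = (some bv, acc ++ [q.2]) := by
        simp [pvStep, heq]
      rw [hstep, ih bv (acc ++ [q.2])]
      have hmin : min bv q.1 = bv := min_eq_left (le_of_eq heq.symm)
      simp only [hmin]
      set m := (V.map Prod.fst).foldl min bv with hmdef
      have hguard : (∀ p ∈ (q :: V), bv ≤ p.1) ↔ (∀ p ∈ V, bv ≤ p.1) := by
        constructor
        · intro h p hp; exact h p (List.mem_cons_of_mem _ hp)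
        · intro h p hp
          rcases List.mem_cons.mp hp with h' | h'
          · subst h'; exact le_of_eq heq.symm
          · exact h p h'
      by_cases hg : ∀ p ∈ V, bv ≤ p.1
      · have hmbv : m = bv := (pv_foldl_min_eq_iff _ _).mpr (by
          intro x hx
          rw [List.mem_map] at hx
          obtain ⟨p, hp, rfl⟩ := hx
          exact hg p hp)
        rw [if_pos hg, if_pos (hguard.mpr hg)]
        have : q.1 = m := by rw [hmbv, heq]
        simp [this]
      · have hmlt : m < bv := by
          have hg' := hg
          push Not at hg'
          obtain ⟨p, hpm, hple⟩ := hg'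
          have := pv_foldl_min_le_mem (V.map Prod.fst) bv _ (List.mem_map_of_mem hpm)
          omega
        rw [if_neg hg, if_neg (fun h => hg (hguard.mp h))]
        have : ¬ q.1 = m := by omega
        simp [this]
    · have hstep : pvStep (some bv, acc) q = (some bv, acc) := by
        simp only [pvStep]
        rw [if_neg (by omega), if_neg (by omega)]
      rw [hstep, ih bv acc]
      have hmin : min bv q.1 = bv := min_eq_left (le_of_lt hgt)
      simp only [hmin]
      set m := (V.map Prod.fst).foldl min bv with hmdef
      have hguard : (∀ p ∈ (q :: V), bv ≤ p.1) ↔ (∀ p ∈ V, bv ≤ p.1) := by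
        constructor
        · intro h p hp; exact h p (List.mem_cons_of_mem _ hp)
        · intro h p hp
          rcases List.mem_cons.mp hp with h' | h'
          · subst h'; exact le_of_lt hgt
          · exact h p h'
      have hqm : ¬ q.1 = m := by
        have := pv_foldl_min_le_init (V.map Prod.fst) bv
        omega
      rw [if_congr hguard rfl rfl]
      simp [hqm]

lemma pv_select {α : Type} (q : Int × α) (V' : List (Int × α)) :
    (q :: V').foldl pvStep ((none : Option Int), ([] : List α))
      = (some ((V'.map Prod.fst).foldl min q.1),
        ((q :: V').filter (fun p => decide (p.1 = (V'.map Prod.fst).foldl min q.1))).map Prod.snd) := by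
  rw [List.foldl_cons]
  have hstep : pvStep ((none : Option Int), ([] : List α)) q = (some q.1, [q.2]) := rfl
  rw [hstep, pv_track V' q.1 [q.2]]
  set m := (V'.map Prod.fst).foldl min q.1 with hmdef
  simp only [List.filter_cons]
  by_cases hqm : q.1 = m
  · have hall : ∀ p ∈ V', q.1 ≤ p.1 := by
      intro p hp
      rw [hqm]
      exact pv_foldl_min_le_mem _ _ _ (List.mem_map_of_mem hp)
    rw [if_pos hall]
    simp [hqm]
  · have hnall : ¬ ∀ p ∈ V', q.1 ≤ p.1 := by
      intro h
      exact hqm ((pv_foldl_min_eq_iff _ _).mpr (by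
        intro x hx
        rw [List.mem_map] at hx
        obtain ⟨p, hp, rfl⟩ := hx
        exact h p hp)).symm
    rw [if_neg hnall]
    simp [hqm]

lemma pv_lists {α β γ : Type} (g : α → Int × β) (h : α → Int × γ)
    (f : Int × γ → β) (q : Int × β → Bool) (q' : Int × γ → Bool)
    (hq : ∀ a, q (g a) = q' (h a)) (him : ∀ a, f (h a) = (g a).2) (l : List α) :
    ((l.map g).filter q).map Prod.snd = ((l.map h).filter q').map f := by
  induction l with
  | nil => simp
  | cons a l ih =>
    simp only [List.map_cons, List.filter_cons, hq a]
    split_ifs with hc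
    · simp only [List.map_cons, him a, ih]
    · exact ih

theorem pv_main (board : List Int) : best_neighbors board = best_neighbors_alt board := by
  simp only [best_neighbors, best_neighbors_alt]
  rw [pvNeighbors_eq, pvTriples_eq]
  rcases hS : pvSkel board (PySem.List.len board) with _ | ⟨p, S'⟩
  · simp only [List.map_nil, List.foldl_nil]
    rfl
  · -- A side: fold is pvStep over the value-annotated list
    have hfoldA : ∀ (L : List (Int × Int)) (init : Option Int × List (List Int × (Int × Int))),
        (L.map (fun p => (PySem.List.pySetD board p.1 p.2, p))).foldl
          (fun (st : Option Int × List (List Int × (Int × Int))) p =>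
            let val := pvConflicts p.1
            match st.1 with
            | none => (some val, [p])
            | some bv =>
              if val < bv then (some val, [p])
              else if val = bv then (some bv, st.2 ++ [p])
              else st) init
        = (L.map (fun p => (pvConflicts (PySem.List.pySetD board p.1 p.2),
            (PySem.List.pySetD board p.1 p.2, p)))).foldl pvStep init := by
      intro L init
      rw [List.foldl_map, List.foldl_map]
      rfl
    rw [hfoldA]
    have hkey : ∀ r ∈ (p :: S'), pvConflicts (PySem.List.pySetD board r.1 r.2)
        = pvVal board (PySem.List.len board) (pvBase board) r.1 r.2 := by
      intro r hr
      have hmem : r ∈ pvSkel board (PySem.List.len board) := by rw [hS]; exact hr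
      obtain ⟨h0, h1⟩ := pvSkel_mem board (PySem.List.len board) r hmem
      exact pv_key board r.1 r.2 h0 h1
    have hmapA : (p :: S').map (fun r => (pvConflicts (PySem.List.pySetD board r.1 r.2),
          (PySem.List.pySetD board r.1 r.2, r)))
        = (p :: S').map (fun r => (pvVal board (PySem.List.len board) (pvBase board) r.1 r.2,
          (PySem.List.pySetD board r.1 r.2, r))) := by
      apply List.map_congr_left
      intro r hr
      rw [hkey r hr]
    rw [hmapA, List.map_cons, pv_select]
    simp only [List.map_cons, List.map_map, Function.comp_def, reduceCtorEq, if_false,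
      PySem.List.min?_id_cons, Option.getD_some]
    rw [pv_foldl_append_if, List.nil_append]
    congr 1
    set M := List.foldl min (pvVal board (PySem.List.len board) (pvBase board) p.1 p.2)
      (List.map (fun x => pvVal board (PySem.List.len board) (pvBase board) x.1 x.2) S') with hM
    have hfin := pv_lists
      (fun r => (pvVal board (PySem.List.len board) (pvBase board) r.1 r.2,
        (PySem.List.pySetD board r.1 r.2, r)))
      (fun r => (pvVal board (PySem.List.len board) (pvBase board) r.1 r.2, r.1, r.2))
      (fun t => (PySem.List.pySetD board t.2.1 t.2.2, t.2.1, t.2.2))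
      (fun q => decide (q.1 = M))
      (fun t => decide (t.1 = M))
      (fun a => rfl) (fun a => rfl) (p :: S')
    simpa only [List.map_cons] using hfin

-- ===== VERDICT (by name: the statement is the Claim_ definition above) =====
theorem best_neighbors_spec : Claim_equal_best_neighbors := by
  intro board _
  unfold Spec_best_neighbors
  exact pv_main board
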